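-- pv_equiv track=rewrite | github.com/silvak14/Detection_d-erreur | checksum.py | somme_fletcher
-- ===== SOURCE A (Python) =====
-- def somme_fletcher(texte):
-- 	checksum1 = []
-- 	checksum2 = []
-- 	somme = 0
--
-- 	#le tableau checksum1
--
-- 	for i in texte:
--
-- 		#ord()La fonction qui va retourner la valeur ASCII
--
-- 		valeur = ord(i)
-- 		somme += valeur
-- 		checksum1.append(somme % 65535)
--
-- 	# le tableau checksum2
--
-- 	counter = 0
-- 	somme = 0
-- 	for i in texte:
-- 		somme += checksum1[counter]
-- 		checksum2.append(somme % 65535)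
-- 		counter += 1
--
-- 	#Pour faire retourner un dictionnaire des deux checksums
--
-- 	return {'checksum1':checksum1,'checksum2':checksum2}
-- ===== SOURCE B (Python) =====
-- def somme_fletcher(texte):
--     checksum1 = []
--     checksum2 = []
--     somme1 = 0
--     somme2 = 0
--     # single pass: maintain both running sums at once
--     for c in texte:
--         somme1 += ord(c)
--         v1 = somme1 % 65535
--         checksum1.append(v1)
--         somme2 += v1
--         checksum2.append(somme2 % 65535)
--     return {'checksum1': checksum1, 'checksum2': checksum2}
-- ===== Notes on version B (the rewrite author's own statement) =====
-- stated objective: simpler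
-- what changed: The two sequential scans (one building checksum1, one re-reading checksum1 by index to build checksum2) are fused into a single pass over texte that maintains both running sums, eliminating the indexed re-read and the counter variable.
import Mathlib
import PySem

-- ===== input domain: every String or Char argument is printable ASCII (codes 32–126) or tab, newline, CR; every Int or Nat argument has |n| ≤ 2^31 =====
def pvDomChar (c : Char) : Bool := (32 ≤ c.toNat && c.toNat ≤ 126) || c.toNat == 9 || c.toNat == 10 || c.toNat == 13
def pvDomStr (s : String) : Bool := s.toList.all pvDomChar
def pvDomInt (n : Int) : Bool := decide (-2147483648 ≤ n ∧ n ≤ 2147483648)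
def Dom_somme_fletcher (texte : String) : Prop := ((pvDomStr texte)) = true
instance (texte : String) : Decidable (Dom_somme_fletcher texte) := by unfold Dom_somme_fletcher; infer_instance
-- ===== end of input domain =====

-- B fuses A's two scans (the second of which re-reads checksum1 by index) into one pass keeping both running sums.

-- ===== PORT A =====
-- first loop: for i in texte: somme += ord(i); checksum1.append(somme % 65535)
def sfLoop1 : List Char → Int → List Int → List Int
  | [], _, acc => acc
  | c :: cs, somme, acc =>
      sfLoop1 cs (somme + (c.toNat : Int)) (acc ++ [PySem.Int.mod (somme + (c.toNat : Int)) 65535])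

-- second loop: for i in texte: somme += checksum1[counter]; checksum2.append(somme % 65535); counter += 1
-- checksum1[counter] is always in range (counter < len(texte) = len(checksum1)), so .getD 0 is never taken.
def sfLoop2 (cs1 : List Int) : List Char → Nat → Int → List Int → List Int
  | [], _, _, acc => acc
  | _ :: cs, counter, somme, acc =>
      let somme' := somme + ((PySem.List.pyGet? cs1 (counter : Int)).getD 0)
      sfLoop2 cs1 cs (counter + 1) somme' (acc ++ [PySem.Int.mod somme' 65535])

def somme_fletcher (texte : String) : List (String × List Int) :=
  [("checksum1", sfLoop1 texte.toList 0 []),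
   ("checksum2", sfLoop2 (sfLoop1 texte.toList 0 []) texte.toList 0 0 [])]

-- ===== PORT B =====
-- single pass: somme1 += ord(c); v1 = somme1 % 65535; append v1; somme2 += v1; append somme2 % 65535
def sfLoopB : List Char → Int → Int → List Int → List Int → List Int × List Int
  | [], _, _, a1, a2 => (a1, a2)
  | c :: cs, s1, s2, a1, a2 =>
      let s1' := s1 + (c.toNat : Int)
      let v1 := PySem.Int.mod s1' 65535
      sfLoopB cs s1' (s2 + v1) (a1 ++ [v1]) (a2 ++ [PySem.Int.mod (s2 + v1) 65535])

def somme_fletcher_alt (texte : String) : List (String × List Int) :=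
  [("checksum1", (sfLoopB texte.toList 0 0 [] []).1),
   ("checksum2", (sfLoopB texte.toList 0 0 [] []).2)]

-- ===== PRECONDITION & SPEC =====
def Spec_somme_fletcher (texte : String) (out : List (String × List Int)) : Prop := out = somme_fletcher_alt texte
instance (texte : String) (out : List (String × List Int)) : Decidable (Spec_somme_fletcher texte out) := by unfold Spec_somme_fletcher; infer_instance

-- ===== CLAIM (what is proved, stated in full; the proofs are below) =====
def Claim_equal_somme_fletcher : Prop := ∀ (texte : String), Dom_somme_fletcher texte → Spec_somme_fletcher texte (somme_fletcher texte)

-- ===== LEMMAS AND PROOFS =====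

-- pure form of A's second loop: a running modded prefix sum over a value list
def sfScan : List Int → Int → List Int → List Int
  | [], _, acc => acc
  | v :: vs, somme, acc => sfScan vs (somme + v) (acc ++ [PySem.Int.mod (somme + v) 65535])

theorem sfLoop1_acc (cs : List Char) : ∀ (s : Int) (acc : List Int),
    sfLoop1 cs s acc = acc ++ sfLoop1 cs s [] := by
  induction cs with
  | nil => intro s acc; simp [sfLoop1]
  | cons c cs ih =>
      intro s acc
      rw [sfLoop1, sfLoop1, List.nil_append]
      conv_rhs => rw [ih]
      rw [ih]
      simp

theorem sfLoop1_length (cs : List Char) : ∀ (s : Int), (sfLoop1 cs s []).length = cs.length := by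
  induction cs with
  | nil => intro s; simp [sfLoop1]
  | cons c cs ih =>
      intro s
      rw [sfLoop1, sfLoop1_acc]
      simp [ih]

-- A's second loop reads cs1[counter], counter stepping by 1: it is sfScan over the suffix of cs1
theorem sfLoop2_eq_scan (cs : List Char) : ∀ (cs1 : List Int) (counter : Nat) (s : Int) (acc : List Int),
    counter + cs.length = cs1.length →
    sfLoop2 cs1 cs counter s acc = sfScan (cs1.drop counter) s acc := by
  induction cs with
  | nil =>
      intro cs1 counter s acc h
      simp at h
      rw [List.drop_eq_nil_of_le (by omega)]
      simp [sfLoop2, sfScan]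
  | cons c cs ih =>
      intro cs1 counter s acc h
      have hlt : counter < cs1.length := by simp at h; omega
      have hget : (PySem.List.pyGet? cs1 (counter : Int)).getD 0 = cs1[counter] := by
        simp [PySem.List.pyGet?_natCast, List.getElem?_eq_getElem hlt]
      have hdrop : cs1.drop counter = cs1[counter] :: cs1.drop (counter + 1) :=
        List.drop_eq_getElem_cons hlt
      rw [sfLoop2, hdrop, sfScan]
      simp only [hget]
      apply ih
      simp at h ⊢; omega

-- the fused loop computes (first loop, sfScan of the first loop's output)
theorem sfLoopB_eq (cs : List Char) : ∀ (s1 s2 : Int) (a1 a2 : List Int),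
    sfLoopB cs s1 s2 a1 a2 = (sfLoop1 cs s1 a1, sfScan (sfLoop1 cs s1 []) s2 a2) := by
  induction cs with
  | nil => intro s1 s2 a1 a2; simp [sfLoopB, sfLoop1, sfScan]
  | cons c cs ih =>
      intro s1 s2 a1 a2
      rw [sfLoopB, ih, sfLoop1, sfLoop1, List.nil_append, sfLoop1_acc cs _ [_]]
      simp only [List.singleton_append]
      rw [sfScan]

-- ===== VERDICT (by name: the statement is the Claim_ definition above) =====
theorem somme_fletcher_spec : Claim_equal_somme_fletcher := by
  intro texte _
  unfold Spec_somme_fletcher somme_fletcher somme_fletcher_alt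
  rw [sfLoopB_eq, sfLoop2_eq_scan texte.toList _ 0 0 [] (by simp [sfLoop1_length])]
  simp
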